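-- pv_equiv track=rewrite | github.com/magv/ibp-benchmark | generate.py | gen_all_indices
-- ===== SOURCE A (Python) =====
-- def gen_all_indices(sector, rmin, rmax, smin, smax, dmin, dmax):
--     if sector == ():
--         if (rmin <= 0 <= rmax) and (smin <= 0 <= smax) and (dmin <= 0 <= dmax):
--             yield ()
--         return
--     if rmax < 0 or smax < 0 or dmax < 0: return
--     indices = []
--     if sector[0]:
--         for i in range(1, rmax + 1):
--             d = max(i - 1, 0)
--             for p in gen_all_indices(sector[1:], rmin-i, rmax-i, smin, smax, dmin-d, dmax-d):
--                 yield (i,) + p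
--     for i in range(0, smax + 1):
--         for p in gen_all_indices(sector[1:], rmin, rmax, smin-i, smax-i, dmin, dmax):
--             yield (-i,) + p
-- ===== SOURCE B (Python) =====
-- def _step(prefixes, s, rmax, smax, dmax):
--     # extend every prefix by one candidate value, pruning by the max budgets
--     cand = (list(range(1, rmax + 1)) if s else []) + [-i for i in range(smax + 1)]
--     nxt = []
--     for (t, r, sm, d) in prefixes:
--         for v in cand:
--             r2 = r + v if v > 0 else r
--             s2 = sm - v if v < 0 else sm
--             d2 = d + v - 1 if v > 0 else d
--             if r2 <= rmax and s2 <= smax and d2 <= dmax: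
--                 nxt.append((t + (v,), r2, s2, d2))
--     return nxt
--
--
-- def gen_all_indices(sector, rmin, rmax, smin, smax, dmin, dmax):
--     # the three sums are nonnegative, so an empty window [max(min,0), max] can never be satisfied
--     if max(rmin, 0) > rmax or max(smin, 0) > smax or max(dmin, 0) > dmax:
--         return []
--     # breadth-first: frontier of (tuple, positive-sum, negative-magnitude-sum, dot-sum)
--     prefixes = [((), 0, 0, 0)]
--     for s in sector:
--         prefixes = _step(prefixes, s, rmax, smax, dmax)
--     return [t for (t, r, sm, d) in prefixes
--             if rmin <= r <= rmax and smin <= sm <= smax and dmin <= d <= dmax]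
-- ===== Notes on version B (the rewrite author's own statement) =====
-- stated objective: alternative
-- what changed: Replaces the depth-first recursive generator that threads six shrinking budget parameters with an iterative breadth-first frontier: after an early [] when some budget window [max(min,0),max] is empty, a list of (prefix, positive-sum, negative-sum, dot-sum) records is extended one sector position at a time against the original budgets, pruned by the max bounds, with a single final filter applying the min bounds.
import Mathlib
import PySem

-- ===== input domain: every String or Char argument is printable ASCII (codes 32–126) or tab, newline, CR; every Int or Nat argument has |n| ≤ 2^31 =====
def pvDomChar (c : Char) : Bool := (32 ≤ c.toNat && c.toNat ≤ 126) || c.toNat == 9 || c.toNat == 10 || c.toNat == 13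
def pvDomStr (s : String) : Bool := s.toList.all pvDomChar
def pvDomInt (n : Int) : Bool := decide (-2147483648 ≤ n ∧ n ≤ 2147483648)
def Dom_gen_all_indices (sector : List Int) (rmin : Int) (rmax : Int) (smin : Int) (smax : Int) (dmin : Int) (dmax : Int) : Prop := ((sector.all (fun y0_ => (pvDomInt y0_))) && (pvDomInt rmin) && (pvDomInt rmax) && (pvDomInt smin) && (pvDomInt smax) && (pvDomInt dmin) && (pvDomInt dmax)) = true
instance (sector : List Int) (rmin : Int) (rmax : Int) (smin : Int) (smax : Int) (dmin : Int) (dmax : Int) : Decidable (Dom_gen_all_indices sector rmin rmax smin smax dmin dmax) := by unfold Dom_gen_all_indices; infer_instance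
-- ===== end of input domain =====

-- B replaces A's depth-first recursive generator (six shrinking budget parameters) by an iterative
-- breadth-first frontier of (prefix, sum records) pruned by the max budgets, with one final min-filter;
-- equivalence of the produced list (same elements, same order) is proved below.

-- ===== PORT A =====
def gen_all_indices (sector : List Int) (rmin : Int) (rmax : Int) (smin : Int) (smax : Int) (dmin : Int) (dmax : Int) : List (List Int) :=
  match sector with
  | [] =>
    if rmin ≤ 0 ∧ 0 ≤ rmax ∧ smin ≤ 0 ∧ 0 ≤ smax ∧ dmin ≤ 0 ∧ 0 ≤ dmax then [([] : List Int)] else []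
  | s0 :: rest =>
    if rmax < 0 ∨ smax < 0 ∨ dmax < 0 then []
    else
      (if s0 ≠ 0 then
        (PySem.List.pyRange 1 (rmax + 1) 1).flatMap (fun i =>
          (gen_all_indices rest (rmin - i) (rmax - i) smin smax (dmin - max (i - 1) 0) (dmax - max (i - 1) 0)).map
            (fun p => i :: p))
      else []) ++
      (PySem.List.pyRange 0 (smax + 1) 1).flatMap (fun i =>
        (gen_all_indices rest rmin rmax (smin - i) (smax - i) dmin dmax).map (fun p => (-i) :: p))

-- ===== PORT B =====
-- one breadth-first step: extend every frontier record by one candidate value, pruning by the max budgets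
def pvAltStep (rmax : Int) (smax : Int) (dmax : Int)
    (prefixes : List (List Int × Int × Int × Int)) (s : Int) : List (List Int × Int × Int × Int) :=
  prefixes.flatMap (fun pr =>
    ((if s ≠ 0 then PySem.List.pyRange 1 (rmax + 1) 1 else []) ++
        (PySem.List.pyRange 0 (smax + 1) 1).map (fun i => -i)).flatMap (fun v =>
      let r2 := if 0 < v then pr.2.1 + v else pr.2.1
      let s2 := if v < 0 then pr.2.2.1 - v else pr.2.2.1
      let d2 := if 0 < v then pr.2.2.2 + v - 1 else pr.2.2.2
      if r2 ≤ rmax ∧ s2 ≤ smax ∧ d2 ≤ dmax then [(pr.1 ++ [v], r2, s2, d2)] else []))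

def gen_all_indices_alt (sector : List Int) (rmin : Int) (rmax : Int) (smin : Int) (smax : Int) (dmin : Int) (dmax : Int) : List (List Int) :=
  if max rmin 0 > rmax ∨ max smin 0 > smax ∨ max dmin 0 > dmax then []
  else
  ((sector.foldl (pvAltStep rmax smax dmax) [([], 0, 0, 0)]).filter
      (fun pr => decide (rmin ≤ pr.2.1 ∧ pr.2.1 ≤ rmax ∧ smin ≤ pr.2.2.1 ∧ pr.2.2.1 ≤ smax ∧ dmin ≤ pr.2.2.2 ∧ pr.2.2.2 ≤ dmax))).map
    (·.1)

-- ===== PRECONDITION & SPEC =====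
def Spec_gen_all_indices (sector : List Int) (rmin : Int) (rmax : Int) (smin : Int) (smax : Int) (dmin : Int) (dmax : Int) (out : List (List Int)) : Prop := out = gen_all_indices_alt sector rmin rmax smin smax dmin dmax
instance (sector : List Int) (rmin : Int) (rmax : Int) (smin : Int) (smax : Int) (dmin : Int) (dmax : Int) (out : List (List Int)) : Decidable (Spec_gen_all_indices sector rmin rmax smin smax dmin dmax out) := by unfold Spec_gen_all_indices; infer_instance

-- ===== CLAIM (what is proved, stated in full; the proofs are below) =====
def Claim_equal_gen_all_indices : Prop := ∀ (sector : List Int) (rmin : Int) (rmax : Int) (smin : Int) (smax : Int) (dmin : Int) (dmax : Int), Dom_gen_all_indices sector rmin rmax smin smax dmin dmax → Spec_gen_all_indices sector rmin rmax smin smax dmin dmax (gen_all_indices sector rmin rmax smin smax dmin dmax)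

-- ===== LEMMAS AND PROOFS =====

-- A returns nothing as soon as one of the max budgets is negative
lemma pv_genA_nil (sector : List Int) (rmin rmax smin smax dmin dmax : Int)
    (h : rmax < 0 ∨ smax < 0 ∨ dmax < 0) :
    gen_all_indices sector rmin rmax smin smax dmin dmax = [] := by
  cases sector with
  | nil => rw [gen_all_indices]; rw [if_neg]; omega
  | cons s0 rest => rw [gen_all_indices]; rw [if_pos h]

-- A yields nothing when one of the [min,max] windows is empty: all recursive calls shift each
-- min/max pair by the same amount, and the base case demands min' ≤ 0 ≤ max'
lemma pv_genA_gap (sector : List Int) (rmin rmax smin smax dmin dmax : Int)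
    (h : rmax < rmin ∨ smax < smin ∨ dmax < dmin) :
    gen_all_indices sector rmin rmax smin smax dmin dmax = [] := by
  induction sector generalizing rmin rmax smin smax dmin dmax with
  | nil => rw [gen_all_indices, if_neg]; omega
  | cons s0 rest ih =>
    rw [gen_all_indices]
    split
    · rfl
    · have hpos : (if s0 ≠ 0 then
          (PySem.List.pyRange 1 (rmax + 1) 1).flatMap (fun i =>
            (gen_all_indices rest (rmin - i) (rmax - i) smin smax (dmin - max (i - 1) 0)
                (dmax - max (i - 1) 0)).map (fun p => i :: p))
          else []) = [] := by
        split
        · refine List.flatMap_eq_nil_iff.mpr ?_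
          intro i _
          rw [ih _ _ _ _ _ _ (by omega)]
          rfl
        · rfl
      have hneg : (PySem.List.pyRange 0 (smax + 1) 1).flatMap (fun i =>
          (gen_all_indices rest rmin rmax (smin - i) (smax - i) dmin dmax).map
            (fun p => (-i) :: p)) = [] := by
        refine List.flatMap_eq_nil_iff.mpr ?_
        intro i _
        rw [ih _ _ _ _ _ _ (by omega)]
        rfl
      rw [hpos, hneg]
      rfl

-- every record pvAltStep produces satisfies the frontier invariant
lemma pv_step_bounds (rmax smax dmax : Int) (P : List (List Int × Int × Int × Int)) (s0 : Int)
    (hP : ∀ pr ∈ P, 0 ≤ pr.2.1 ∧ 0 ≤ pr.2.2.1 ∧ 0 ≤ pr.2.2.2)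
    (pr : List Int × Int × Int × Int) (hpr : pr ∈ pvAltStep rmax smax dmax P s0) :
    0 ≤ pr.2.1 ∧ pr.2.1 ≤ rmax ∧ 0 ≤ pr.2.2.1 ∧ pr.2.2.1 ≤ smax ∧ 0 ≤ pr.2.2.2 ∧ pr.2.2.2 ≤ dmax := by
  simp only [pvAltStep, List.mem_flatMap] at hpr
  obtain ⟨pr0, hpr0, v, hv, hmem⟩ := hpr
  obtain ⟨h1, h2, h3⟩ := hP pr0 hpr0
  by_cases h0 : 0 < v <;> by_cases hneg : v < 0 <;>
    simp only [h0, hneg, if_pos, if_neg, not_false_eq_true] at hmem <;>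
    first
    | omega
    | (split at hmem
       · next hc =>
         simp only [List.mem_singleton] at hmem
         subst hmem
         exact ⟨by dsimp only; omega, hc.1, by dsimp only; omega, hc.2.1, by dsimp only; omega, hc.2.2⟩
       · simp at hmem)
-- a flatMap over an integer range all of whose terms are empty is empty
lemma pv_flatMap_outside {α : Type} (a b : Int) (f : Int → List α)
    (h : ∀ v, a ≤ v → v < b → f v = []) : (PySem.List.pyRange a b 1).flatMap f = [] :=
  List.flatMap_eq_nil_iff.mpr (fun v hv =>
    h v ((PySem.List.mem_pyRange_one).mp hv).1 ((PySem.List.mem_pyRange_one).mp hv).2)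

-- the positive branch: A's loop over range(1, rmax'+1) matches B's pruned loop over range(1, rmax+1)
lemma pv_pos (rmin rmax smin smax dmin dmax r s d : Int) (rest t : List Int)
    (hr0 : 0 ≤ r) (hr1 : r ≤ rmax) (hs1 : s ≤ smax) (_hd0 : 0 ≤ d) :
    (PySem.List.pyRange 1 (rmax + 1) 1).flatMap (fun v =>
        (if (if 0 < v then r + v else r) ≤ rmax ∧ (if v < 0 then s - v else s) ≤ smax ∧
            (if 0 < v then d + v - 1 else d) ≤ dmax
         then [((t ++ [v], (if 0 < v then r + v else r), (if v < 0 then s - v else s),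
                 (if 0 < v then d + v - 1 else d)) : List Int × Int × Int × Int)]
         else []).flatMap (fun pr' =>
          (gen_all_indices rest (rmin - pr'.2.1) (rmax - pr'.2.1) (smin - pr'.2.2.1) (smax - pr'.2.2.1)
              (dmin - pr'.2.2.2) (dmax - pr'.2.2.2)).map (fun p => pr'.1 ++ p)))
    = ((PySem.List.pyRange 1 ((rmax - r) + 1) 1).flatMap (fun i =>
        (gen_all_indices rest ((rmin - r) - i) ((rmax - r) - i) (smin - s) (smax - s)
            ((dmin - d) - max (i - 1) 0) ((dmax - d) - max (i - 1) 0)).map (fun p => i :: p))).map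
        (fun p => t ++ p) := by
  rw [List.map_flatMap]
  rw [PySem.List.pyRange_one_append 1 ((rmax - r) + 1) (rmax + 1) (by omega) (by omega),
    List.flatMap_append]
  rw [pv_flatMap_outside ((rmax - r) + 1) (rmax + 1) _ ?h2, List.append_nil]
  case h2 =>
    intro v h1v h2v
    have h0 : (0 : Int) < v := by omega
    rw [if_neg (by simp only [if_pos h0]; omega)]
    rfl
  refine List.flatMap_congr ?_
  intro v hv
  have hv' := (PySem.List.mem_pyRange_one).mp hv
  have h0 : (0 : Int) < v := by omega
  have hnn : ¬ v < 0 := by omega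
  simp only [if_pos h0, if_neg hnn]
  have hm : max (v - 1) 0 = v - 1 := by omega
  by_cases hd : d + v - 1 ≤ dmax
  · rw [if_pos ⟨by omega, by omega, hd⟩]
    simp only [List.flatMap_cons, List.flatMap_nil, List.append_nil]
    rw [hm]
    simp only [List.append_assoc, List.singleton_append, sub_sub,
      show d + v - 1 = d + (v - 1) by ring]
    rw [List.map_map]
    rfl
  · rw [if_neg (by omega)]
    rw [hm]
    rw [pv_genA_nil rest ((rmin - r) - v) ((rmax - r) - v) (smin - s) (smax - s)
      ((dmin - d) - (v - 1)) ((dmax - d) - (v - 1)) (by omega)]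
    rfl

-- the nonpositive branch: A's loop over range(0, smax'+1) matches B's pruned candidates -range(0, smax+1)
lemma pv_neg (rmin rmax smin smax dmin dmax r s d : Int) (rest t : List Int)
    (hr1 : r ≤ rmax) (hs0 : 0 ≤ s) (hs1 : s ≤ smax) (hd1 : d ≤ dmax) :
    ((PySem.List.pyRange 0 (smax + 1) 1).map (fun i => -i)).flatMap (fun v =>
        (if (if 0 < v then r + v else r) ≤ rmax ∧ (if v < 0 then s - v else s) ≤ smax ∧
            (if 0 < v then d + v - 1 else d) ≤ dmax
         then [((t ++ [v], (if 0 < v then r + v else r), (if v < 0 then s - v else s),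
                 (if 0 < v then d + v - 1 else d)) : List Int × Int × Int × Int)]
         else []).flatMap (fun pr' =>
          (gen_all_indices rest (rmin - pr'.2.1) (rmax - pr'.2.1) (smin - pr'.2.2.1) (smax - pr'.2.2.1)
              (dmin - pr'.2.2.2) (dmax - pr'.2.2.2)).map (fun p => pr'.1 ++ p)))
    = ((PySem.List.pyRange 0 ((smax - s) + 1) 1).flatMap (fun i =>
        (gen_all_indices rest (rmin - r) (rmax - r) ((smin - s) - i) ((smax - s) - i)
            (dmin - d) (dmax - d)).map (fun p => (-i) :: p))).map (fun p => t ++ p) := by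
  rw [List.flatMap_map, List.map_flatMap]
  rw [PySem.List.pyRange_one_append 0 ((smax - s) + 1) (smax + 1) (by omega) (by omega),
    List.flatMap_append]
  rw [pv_flatMap_outside ((smax - s) + 1) (smax + 1) _ ?h2, List.append_nil]
  case h2 =>
    intro i h1i h2i
    rw [if_neg (by
      simp only [if_neg (show ¬ (0 : Int) < -i by omega), if_pos (show (-i : Int) < 0 by omega)]
      omega)]
    rfl
  refine List.flatMap_congr ?_
  intro i hi
  have hi' := (PySem.List.mem_pyRange_one).mp hi
  have hn : ¬ (0 : Int) < -i := by omega
  have hsv : (if -i < 0 then s - -i else s) = s + i := by split <;> omega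
  simp only [if_neg hn, hsv]
  rw [if_pos ⟨hr1, by omega, hd1⟩]
  simp only [List.flatMap_cons, List.flatMap_nil, List.append_nil]
  simp only [List.append_assoc, List.singleton_append, sub_sub]
  rw [List.map_map]
  rfl

-- frontier invariant: the filtered final frontier, projected to its tuples, is the concatenation of
-- A's completions of each frontier record under the correspondingly shifted budgets
lemma pv_inv (rmin rmax smin smax dmin dmax : Int) (sector : List Int)
    (P : List (List Int × Int × Int × Int))
    (hP : ∀ pr ∈ P, 0 ≤ pr.2.1 ∧ pr.2.1 ≤ rmax ∧ 0 ≤ pr.2.2.1 ∧ pr.2.2.1 ≤ smax ∧ 0 ≤ pr.2.2.2 ∧ pr.2.2.2 ≤ dmax) :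
    ((sector.foldl (pvAltStep rmax smax dmax) P).filter
        (fun pr => decide (rmin ≤ pr.2.1 ∧ pr.2.1 ≤ rmax ∧ smin ≤ pr.2.2.1 ∧ pr.2.2.1 ≤ smax ∧ dmin ≤ pr.2.2.2 ∧ pr.2.2.2 ≤ dmax))).map (·.1)
    = P.flatMap (fun pr =>
        (gen_all_indices sector (rmin - pr.2.1) (rmax - pr.2.1) (smin - pr.2.2.1) (smax - pr.2.2.1)
            (dmin - pr.2.2.2) (dmax - pr.2.2.2)).map (fun p => pr.1 ++ p)) := by
  induction sector generalizing P with
  | nil =>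
    clear hP
    simp only [List.foldl_nil]
    induction P with
    | nil => simp
    | cons pr P ihp =>
      simp only [List.filter_cons, List.flatMap_cons, ← ihp]
      rw [gen_all_indices]
      by_cases hc : rmin ≤ pr.2.1 ∧ pr.2.1 ≤ rmax ∧ smin ≤ pr.2.2.1 ∧ pr.2.2.1 ≤ smax ∧
          dmin ≤ pr.2.2.2 ∧ pr.2.2.2 ≤ dmax
      · rw [if_pos (show rmin - pr.2.1 ≤ 0 ∧ 0 ≤ rmax - pr.2.1 ∧ smin - pr.2.2.1 ≤ 0 ∧
          0 ≤ smax - pr.2.2.1 ∧ dmin - pr.2.2.2 ≤ 0 ∧ 0 ≤ dmax - pr.2.2.2 by omega)]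
        rw [if_pos (decide_eq_true hc)]
        simp only [List.map_cons, List.map_nil, List.singleton_append, List.append_nil]
      · rw [if_neg (show ¬ (rmin - pr.2.1 ≤ 0 ∧ 0 ≤ rmax - pr.2.1 ∧ smin - pr.2.2.1 ≤ 0 ∧
          0 ≤ smax - pr.2.2.1 ∧ dmin - pr.2.2.2 ≤ 0 ∧ 0 ≤ dmax - pr.2.2.2) by omega)]
        rw [if_neg (by simpa using hc)]
        simp only [List.map_nil, List.nil_append]
  | cons s0 rest ih =>
    rw [List.foldl_cons,
      ih (pvAltStep rmax smax dmax P s0) (fun pr hpr =>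
        pv_step_bounds rmax smax dmax P s0
          (fun q hq => by have := hP q hq; exact ⟨this.1, this.2.2.1, this.2.2.2.2.1⟩) pr hpr)]
    rw [pvAltStep, List.flatMap_assoc]
    refine List.flatMap_congr ?_
    intro pr hpr
    obtain ⟨hr0, hr1, hs0, hs1, hd0, hd1⟩ := hP pr hpr
    rw [List.flatMap_assoc]
    conv_rhs => rw [gen_all_indices]
    rw [if_neg (show ¬ (rmax - pr.2.1 < 0 ∨ smax - pr.2.2.1 < 0 ∨ dmax - pr.2.2.2 < 0) by omega)]
    rw [List.map_append]
    rw [List.flatMap_append]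
    dsimp only
    congr 1
    · by_cases hz : s0 ≠ 0
      · simp only [if_pos hz]
        exact pv_pos rmin rmax smin smax dmin dmax pr.2.1 pr.2.2.1 pr.2.2.2 rest pr.1
          hr0 hr1 hs1 hd0
      · simp only [if_neg hz]
        rfl
    · exact pv_neg rmin rmax smin smax dmin dmax pr.2.1 pr.2.2.1 pr.2.2.2 rest pr.1
        hr1 hs0 hs1 hd1

lemma pv_foldl_step_nil (rmax smax dmax : Int) (sector : List Int) :
    sector.foldl (pvAltStep rmax smax dmax) [] = [] := by
  induction sector with
  | nil => rfl
  | cons s0 rest ih => simpa [pvAltStep] using ih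

-- ===== VERDICT (by name: the statement is the Claim_ definition above) =====
theorem gen_all_indices_spec : Claim_equal_gen_all_indices := by
  intro sector rmin rmax smin smax dmin dmax _
  unfold Spec_gen_all_indices gen_all_indices_alt
  by_cases hg : max rmin 0 > rmax ∨ max smin 0 > smax ∨ max dmin 0 > dmax
  · rw [if_pos hg]
    by_cases h : rmax < 0 ∨ smax < 0 ∨ dmax < 0
    · rw [pv_genA_nil sector rmin rmax smin smax dmin dmax h]
    · rw [pv_genA_gap sector rmin rmax smin smax dmin dmax (by omega)]
  rw [if_neg hg]
  by_cases h : rmax < 0 ∨ smax < 0 ∨ dmax < 0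
  · rw [pv_genA_nil _ _ _ _ _ _ _ h]
    cases sector with
    | nil => simp; omega
    | cons s0 rest =>
      rw [List.foldl_cons]
      have h0 : pvAltStep rmax smax dmax [([], 0, 0, 0)] s0 = [] := by
        rw [List.eq_nil_iff_forall_not_mem]
        intro pr hpr
        have := pv_step_bounds rmax smax dmax _ s0
          (by intro q hq; simp at hq; subst hq; simp) pr hpr
        omega
      rw [h0, pv_foldl_step_nil]
      rfl
  · simp only [not_or, not_lt] at h
    rw [pv_inv rmin rmax smin smax dmin dmax sector [([], 0, 0, 0)]
      (by intro pr hpr; simp at hpr; subst hpr; simp; omega)]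
    simp
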